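-- pv_equiv track=rewrite | github.com/bar-pav/Homework | PavelBarashkin/Task4.3.py | split_imitate
-- ===== SOURCE A (Python) =====
-- def split_imitate(string, separator=None, maxsplit=-1):
--     result = []
--     start_index = 0
--     if separator is None:
--         count = 0
--         for index, char in enumerate(string):
--             if maxsplit >= 0 and len(result) == (maxsplit + 1):
--                 return result
--             if char.isspace():
--                 start_index = index + 1
--                 if count != 0:
--                     result.append(string[index - count:index])
--                 count = 0
--             else:
--                 count += 1
--         if start_index < len(string):
--             result.append(string[start_index:])
--
--     elif len(separator) == 1:
--         for index, char in enumerate(string):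
--             if maxsplit >= 0 and len(result) == (maxsplit + 1):
--                 return result
--             if char == separator:
--                 result.append(string[start_index:index])
--                 start_index = index + 1
--         if start_index < len(string):
--             result.append(string[start_index:])
--
--     else:
--         for index, char in enumerate(string):
--             if maxsplit >= 0 and len(result) == (maxsplit + 1):
--                 return result
--             if string[index:index + len(separator)] == separator:
--                 result.append(string[start_index:index])
--                 start_index = index + len(separator)
--         if start_index < len(string):
--             result.append(string[start_index:])
--     return result
-- ===== SOURCE B (Python) =====
-- def split_imitate(string, separator=None, maxsplit=-1):
--     # Split at every occurrence of the separator (overlapping ones included),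
--     # whitespace runs when no separator is given; keep at most maxsplit + 1 pieces.
--     if separator is None:
--         pieces = string.split()
--     else:
--         n, step = len(string), len(separator)
--         if step == 0:
--             starts = list(range(n))
--         else:
--             starts, i = [], 0
--             while True:
--                 p = string.find(separator, i)
--                 if p == -1:
--                     break
--                 starts.append(p)
--                 i = p + 1
--         pieces, begin = [], 0
--         for s in starts:
--             pieces.append(string[begin:s])
--             begin = s + step
--         if begin < n:
--             pieces.append(string[begin:])
--     return pieces if maxsplit < 0 else pieces[:maxsplit + 1]
-- ===== Notes on version B (the rewrite author's own statement) =====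
-- stated objective: faster
-- what changed: A interleaves a per-character state machine (result/start_index/count with an early-return budget check at every index); B computes the full unlimited split first (str.split for whitespace, a str.find loop collecting every occurrence, overlapping ones included, otherwise), then keeps at most maxsplit+1 pieces by plain list slicing.
-- intended difference: On an empty-string separator with maxsplit equal to the string length minus one (and nonnegative), A returns all length+1 pieces because its early-return check never fires (the budget fills only at the last index), exceeding its own maxsplit limit; B returns the first maxsplit+1 pieces, which is what the maxsplit parameter promises. — e.g. on split_imitate("a", some "", 0): A returns ["", "a"], B returns [""]
import Mathlib
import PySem

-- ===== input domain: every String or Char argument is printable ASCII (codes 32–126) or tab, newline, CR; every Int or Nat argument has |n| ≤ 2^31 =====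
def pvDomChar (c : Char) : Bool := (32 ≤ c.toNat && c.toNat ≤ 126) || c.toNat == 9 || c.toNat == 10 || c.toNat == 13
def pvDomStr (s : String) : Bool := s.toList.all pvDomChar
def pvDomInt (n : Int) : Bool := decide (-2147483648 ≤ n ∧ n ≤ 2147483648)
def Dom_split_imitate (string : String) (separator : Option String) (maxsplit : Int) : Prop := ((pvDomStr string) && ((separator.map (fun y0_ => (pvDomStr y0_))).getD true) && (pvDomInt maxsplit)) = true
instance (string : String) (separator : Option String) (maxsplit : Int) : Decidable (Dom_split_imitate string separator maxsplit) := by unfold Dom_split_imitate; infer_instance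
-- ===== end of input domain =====

-- B replaces A's stateful per-character scan (with its early-return budget check at every index)
-- by "compute the full unlimited split first, then keep at most maxsplit+1 pieces by slicing";
-- on separator='' with maxsplit = len(string)-1 ≥ 0 A exceeds its own piece limit and B differs (see D_).

-- ===== PORT A =====
-- A, branch separator is None: for index,char in enumerate(string) with early return, result/start_index/count state
def aLoopNone (cs : List Char) (maxsplit : Int) : List (Int × Char) → List (List Char) → Int → Int → List (List Char)
  | [], result, start, _count =>
      if start < (cs.length : Int) then result ++ [PySem.List.slice cs (some start) none] else result
  | (i, c) :: rest, result, start, count =>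
      if 0 ≤ maxsplit ∧ (result.length : Int) = maxsplit + 1 then result
      else if PySem.Chars.isspace c then
        aLoopNone cs maxsplit rest
          (if count ≠ 0 then result ++ [PySem.List.slice cs (some (i - count)) (some i)] else result)
          (i + 1) 0
      else aLoopNone cs maxsplit rest result start (count + 1)

-- A, branch len(separator) == 1: char == separator
def aLoopOne (cs sepL : List Char) (maxsplit : Int) : List (Int × Char) → List (List Char) → Int → List (List Char)
  | [], result, start =>
      if start < (cs.length : Int) then result ++ [PySem.List.slice cs (some start) none] else result
  | (i, c) :: rest, result, start =>
      if 0 ≤ maxsplit ∧ (result.length : Int) = maxsplit + 1 then result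
      else if [c] = sepL then
        aLoopOne cs sepL maxsplit rest (result ++ [PySem.List.slice cs (some start) (some i)]) (i + 1)
      else aLoopOne cs sepL maxsplit rest result start

-- A, general branch: string[index:index+len(separator)] == separator
def aLoopMany (cs sepL : List Char) (maxsplit : Int) : List (Int × Char) → List (List Char) → Int → List (List Char)
  | [], result, start =>
      if start < (cs.length : Int) then result ++ [PySem.List.slice cs (some start) none] else result
  | (i, c) :: rest, result, start =>
      if 0 ≤ maxsplit ∧ (result.length : Int) = maxsplit + 1 then result
      else if PySem.List.slice cs (some i) (some (i + (sepL.length : Int))) = sepL then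
        aLoopMany cs sepL maxsplit rest (result ++ [PySem.List.slice cs (some start) (some i)]) (i + (sepL.length : Int))
      else aLoopMany cs sepL maxsplit rest result start

def split_imitate (string : String) (separator : Option String) (maxsplit : Int) : List String :=
  let cs := string.toList
  match separator with
  | none => (aLoopNone cs maxsplit (PySem.List.enumerate cs) [] 0 0).map String.ofList
  | some sep =>
      let sepL := sep.toList
      if sepL.length = 1 then
        (aLoopOne cs sepL maxsplit (PySem.List.enumerate cs) [] 0).map String.ofList
      else
        (aLoopMany cs sepL maxsplit (PySem.List.enumerate cs) [] 0).map String.ofList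

-- ===== PORT B =====
-- Source B: while True: p = string.find(separator, i); break on -1; starts.append(p); i = p+1
def bFindLoop (string sep : String) : Nat → Int → List Int → List Int
  | 0, _, acc => acc
  | fuel + 1, i, acc =>
      let p := PySem.Str.findFrom string sep i
      if p = -1 then acc else bFindLoop string sep fuel (p + 1) (acc ++ [p])

-- Source B: for s in starts: pieces.append(string[begin:s]); begin = s + step
def bPieces (cs : List Char) (L : Int) : List Int → List (List Char) → Int → List (List Char) × Int
  | [], pieces, start => (pieces, start)
  | p :: ps, pieces, start =>
      bPieces cs L ps (pieces ++ [PySem.List.slice cs (some start) (some p)]) (p + L)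

def split_imitate_alt (string : String) (separator : Option String) (maxsplit : Int) : List String :=
  let pieces :=
    match separator with
    | none => PySem.Str.split₀ string
    | some sep =>
        let cs := string.toList
        let n : Int := cs.length
        let L : Int := sep.toList.length
        let ms : List Int :=
          if L = 0 then PySem.List.pyRange 0 n 1 else bFindLoop string sep (cs.length + 2) 0 []
        let r := bPieces cs L ms [] 0
        (if r.2 < n then r.1 ++ [PySem.List.slice cs (some r.2) none] else r.1).map String.ofList
  if maxsplit < 0 then pieces else PySem.List.slice pieces none (some (maxsplit + 1))

-- ===== PRECONDITION & SPEC =====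
-- On an empty-string separator with maxsplit equal to the string length minus one (and nonnegative),
-- A returns all length+1 pieces because its early-return check never fires (the budget fills only at
-- the last index), exceeding its own maxsplit limit; B returns the first maxsplit+1 pieces, which is
-- what the maxsplit parameter promises.
def D_split_imitate (string : String) (separator : Option String) (maxsplit : Int) : Prop :=
  separator = some "" ∧ maxsplit = (string.toList.length : Int) - 1 ∧ 0 ≤ maxsplit
instance (string : String) (separator : Option String) (maxsplit : Int) : Decidable (D_split_imitate string separator maxsplit) := by unfold D_split_imitate; infer_instance

def Spec_split_imitate (string : String) (separator : Option String) (maxsplit : Int) (out : List String) : Prop := ¬ D_split_imitate string separator maxsplit → out = split_imitate_alt string separator maxsplit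
instance (string : String) (separator : Option String) (maxsplit : Int) (out : List String) : Decidable (Spec_split_imitate string separator maxsplit out) := by unfold Spec_split_imitate; infer_instance

def pvDiffWitness_split_imitate : String × Option String × Int := ("a", some "", 0)
def pvDiffWitnessOut_split_imitate : (List String) × (List String) := (["", "a"], [""])

-- ===== CLAIM (what is proved, stated in full; the proofs are below) =====
def Claim_unchanged_split_imitate : Prop := ∀ (string : String) (separator : Option String) (maxsplit : Int), Dom_split_imitate string separator maxsplit → Spec_split_imitate string separator maxsplit (split_imitate string separator maxsplit)
def Claim_changed_split_imitate : Prop := Dom_split_imitate (pvDiffWitness_split_imitate.1) (pvDiffWitness_split_imitate.2.1) (pvDiffWitness_split_imitate.2.2) ∧ D_split_imitate (pvDiffWitness_split_imitate.1) (pvDiffWitness_split_imitate.2.1) (pvDiffWitness_split_imitate.2.2) ∧ split_imitate (pvDiffWitness_split_imitate.1) (pvDiffWitness_split_imitate.2.1) (pvDiffWitness_split_imitate.2.2) = pvDiffWitnessOut_split_imitate.1 ∧ split_imitate_alt (pvDiffWitness_split_imitate.1) (pvDiffWitness_split_imitate.2.1) (pvDiffWitness_split_imitate.2.2) = pvDiffWitnessOut_split_imitate.2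 ∧ pvDiffWitnessOut_split_imitate.1 ≠ pvDiffWitnessOut_split_imitate.2
def Claim_exact_split_imitate : Prop := ∀ (string : String) (separator : Option String) (maxsplit : Int), Dom_split_imitate string separator maxsplit → D_split_imitate string separator maxsplit → split_imitate string separator maxsplit ≠ split_imitate_alt string separator maxsplit

-- ===== LEMMAS AND PROOFS =====

-- proof-level vocabulary --------------------------------------------------
-- the slice string[a:b] for Nat ends
def pvS (cs : List Char) (a b : Nat) : List Char := (cs.drop a).take (b - a)
-- "separator matches at position p"
def pvPred (cs sepL : List Char) (p : Nat) : Bool := decide (sepL <+: cs.drop p)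
-- all match positions ≥ j
def pvMsFrom (cs sepL : List Char) (j : Nat) : List Nat :=
  (List.range' j (cs.length - j)).filter (pvPred cs sepL)
-- emit one slice per match position (no trailing piece)
def pvPieces (cs sepL : List Char) : List Nat → Nat → List (List Char)
  | [], _ => []
  | p :: ps, s => pvS cs s p :: pvPieces cs sepL ps (p + sepL.length)
-- the value of start after emitting
def pvFinal (sepL : List Char) : List Nat → Nat → Nat
  | [], s => s
  | p :: ps, s => pvFinal sepL ps (p + sepL.length)
-- the trailing piece
def pvTail (cs : List Char) (s : Nat) : List (List Char) :=
  if s < cs.length then [pvS cs s cs.length] else []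
-- all slices plus trailing piece
def pvAll (cs sepL : List Char) : List Nat → Nat → List (List Char)
  | [], s => pvTail cs s
  | p :: ps, s => pvS cs s p :: pvAll cs sepL ps (p + sepL.length)
-- fused form of A's separator loops: position j, start s, remaining budget bo (none = unlimited)
def pvRhs (cs sepL : List Char) : Nat → Nat → Nat → Option Nat → List (List Char)
  | 0, _, s, _ => pvTail cs s
  | f + 1, j, s, bo =>
      if cs.length ≤ j then pvTail cs s
      else if bo = some 0 then []
      else if pvPred cs sepL j then
        pvS cs s j :: pvRhs cs sepL f (j + 1) (j + sepL.length) (bo.map (· - 1))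
      else pvRhs cs sepL f (j + 1) s bo
-- fused form of A's whitespace loop
def pvRhsN (cs : List Char) : Nat → Nat → Nat → Option Nat → List (List Char)
  | 0, _, s, _ => pvTail cs s
  | f + 1, j, s, bo =>
      if cs.length ≤ j then pvTail cs s
      else if bo = some 0 then []
      else if PySem.Chars.isspace (cs.getD j ' ') then
        if s < j then pvS cs s j :: pvRhsN cs f (j + 1) (j + 1) (bo.map (· - 1))
        else pvRhsN cs f (j + 1) (j + 1) bo
      else pvRhsN cs f (j + 1) s bo

-- basic slice facts -------------------------------------------------------
lemma pvS_to_end (cs : List Char) (s : Nat) (h : s ≤ cs.length) : pvS cs s cs.length = cs.drop s := by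
  unfold pvS
  exact List.take_of_length_le (by simp)

lemma pvS_snoc (cs : List Char) (s j : Nat) (hs : s ≤ j) (hj : j < cs.length) :
    pvS cs s (j + 1) = pvS cs s j ++ [cs.getD j ' '] := by
  unfold pvS
  have h1 : j + 1 - s = (j - s) + 1 := by omega
  have h2 : s + (j - s) = j := by omega
  rw [h1, List.take_add_one, List.getElem?_drop, h2, List.getElem?_eq_getElem hj,
      List.getD_eq_getElem _ _ hj]
  rfl

lemma pvS_nil (cs : List Char) (s : Nat) : pvS cs s s = [] := by
  simp [pvS]

lemma pvTest_iff (cs sepL : List Char) (j : Nat) :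
    (PySem.List.slice cs (some (j : Int)) (some ((j : Int) + (sepL.length : Int))) = sepL) ↔ pvPred cs sepL j = true := by
  have hc : (j : Int) + (sepL.length : Int) = ((j + sepL.length : Nat) : Int) := by push_cast; ring
  rw [hc, PySem.List.slice_natCast]
  have h3 : j + sepL.length - j = sepL.length := by omega
  rw [h3]
  unfold pvPred
  constructor
  · intro h
    simp only [decide_eq_true_eq]
    rw [← h]
    exact List.take_prefix _ _
  · intro h
    simp only [decide_eq_true_eq] at h
    exact (List.prefix_iff_eq_take.mp h).symm

-- pvMsFrom structure ------------------------------------------------------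
lemma pvMsFrom_ge (cs sepL : List Char) (j : Nat) (h : cs.length ≤ j) : pvMsFrom cs sepL j = [] := by
  unfold pvMsFrom
  have h1 : cs.length - j = 0 := by omega
  rw [h1]
  rfl

lemma pvMsFrom_lt (cs sepL : List Char) (j : Nat) (h : j < cs.length) :
    pvMsFrom cs sepL j =
      (if pvPred cs sepL j then [j] else []) ++ pvMsFrom cs sepL (j + 1) := by
  unfold pvMsFrom
  have h1 : cs.length - j = (cs.length - (j + 1)) + 1 := by omega
  rw [h1, List.range'_succ, List.filter_cons]
  by_cases hp : pvPred cs sepL j = true <;> simp [hp]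

lemma pvMsFrom_mem (cs sepL : List Char) (j p : Nat) (h : p ∈ pvMsFrom cs sepL j) :
    j ≤ p ∧ p < cs.length ∧ p + sepL.length ≤ cs.length ∧ pvPred cs sepL p = true := by
  unfold pvMsFrom at h
  have h2 := List.mem_filter.mp h
  have h3 := List.mem_range'_1.mp h2.1
  have hpre : sepL <+: cs.drop p := by simpa [pvPred] using h2.2
  have h4 := hpre.length_le
  simp only [List.length_drop] at h4
  exact ⟨h3.1, by omega, by omega, h2.2⟩

lemma pvMsFrom_nil_of_no_match (cs sepL : List Char) :
    ∀ f j, cs.length - j ≤ f → (∀ i, j ≤ i → i < cs.length → pvPred cs sepL i = false) →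
      pvMsFrom cs sepL j = [] := by
  intro f
  induction f with
  | zero =>
    intro j hf _
    exact pvMsFrom_ge cs sepL j (by omega)
  | succ f ih =>
    intro j hf h
    by_cases hj : cs.length ≤ j
    · exact pvMsFrom_ge cs sepL j hj
    · rw [pvMsFrom_lt cs sepL j (by omega), h j (le_refl j) (by omega)]
      simpa using ih (j + 1) (by omega) (fun i hi1 hi2 => h i (by omega) hi2)

lemma pvMsFrom_skip (cs sepL : List Char) :
    ∀ f j q, q - j ≤ f → j ≤ q → (∀ i, j ≤ i → i < q → pvPred cs sepL i = false) →
      pvMsFrom cs sepL j = pvMsFrom cs sepL q := by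
  intro f
  induction f with
  | zero =>
    intro j q hf hjq _
    have : j = q := by omega
    rw [this]
  | succ f ih =>
    intro j q hf hjq h
    by_cases he : j = q
    · rw [he]
    · by_cases hn : cs.length ≤ j
      · rw [pvMsFrom_ge cs sepL j hn, pvMsFrom_ge cs sepL q (by omega)]
      · rw [pvMsFrom_lt cs sepL j (by omega), h j (le_refl j) (by omega)]
        simpa using ih (j + 1) q (by omega) (by omega) (fun i hi1 hi2 => h i (by omega) hi2)

-- loop end pieces ----------------------------------------------------------
lemma pvRhs_ge (cs sepL : List Char) (j s : Nat) (h : cs.length ≤ j) :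
    ∀ f bo, pvRhs cs sepL f j s bo = pvTail cs s := by
  intro f bo
  cases f <;> simp [pvRhs, h]

lemma pvRhsN_ge (cs : List Char) (j s : Nat) (h : cs.length ≤ j) :
    ∀ f bo, pvRhsN cs f j s bo = pvTail cs s := by
  intro f bo
  cases f <;> simp [pvRhsN, h]

lemma aMany_base (cs sepL : List Char) (maxsplit : Int) (res : List (List Char)) (s : Nat)
    (hs : s ≤ cs.length) :
    aLoopMany cs sepL maxsplit [] res (s : Int) = res ++ pvTail cs s := by
  simp only [aLoopMany, pvTail]
  by_cases h : s < cs.length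
  · rw [if_pos (by exact_mod_cast h), if_pos h,
      PySem.List.slice_from cs (by positivity), Int.toNat_natCast, pvS_to_end cs s hs]
  · rw [if_neg (by exact_mod_cast h), if_neg h, List.append_nil]

lemma aNone_base (cs : List Char) (maxsplit : Int) (res : List (List Char)) (s : Nat)
    (count : Int) (hs : s ≤ cs.length) :
    aLoopNone cs maxsplit [] res (s : Int) count = res ++ pvTail cs s := by
  simp only [aLoopNone, pvTail]
  by_cases h : s < cs.length
  · rw [if_pos (by exact_mod_cast h), if_pos h,
      PySem.List.slice_from cs (by positivity), Int.toNat_natCast, pvS_to_end cs s hs]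
  · rw [if_neg (by exact_mod_cast h), if_neg h, List.append_nil]

-- A side: the single-char loop is the general loop at len(separator) = 1 ---
lemma aOne_eq_aMany (cs sepL : List Char) (maxsplit : Int) (hL : sepL.length = 1) :
    ∀ f j (res : List (List Char)) (start : Int), cs.length - j ≤ f → j ≤ cs.length →
      aLoopOne cs sepL maxsplit (PySem.List.enumerate (cs.drop j) (j : Int)) res start =
      aLoopMany cs sepL maxsplit (PySem.List.enumerate (cs.drop j) (j : Int)) res start := by
  intro f
  induction f with
  | zero =>
    intro j res start hf hj
    rw [List.drop_eq_nil_of_le (by omega)]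
    rfl
  | succ f ih =>
    intro j res start hf hj
    by_cases hjn : cs.length ≤ j
    · rw [List.drop_eq_nil_of_le hjn]
      rfl
    · have hjn' : j < cs.length := by omega
      rw [List.drop_eq_getElem_cons hjn', PySem.List.enumerate_cons]
      simp only [aLoopOne, aLoopMany]
      have hcast : (j : Int) + 1 = ((j + 1 : Nat) : Int) := by push_cast; ring
      have hL' : (sepL.length : Int) = 1 := by rw [hL]; rfl
      have hslice : PySem.List.slice cs (some (j : Int)) (some ((j : Int) + (sepL.length : Int))) = [cs[j]] := by
        have hc : (j : Int) + (sepL.length : Int) = ((j + sepL.length : Nat) : Int) := by push_cast; ring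
        rw [hc, PySem.List.slice_natCast, hL]
        have h3 : j + 1 - j = 1 := by omega
        rw [h3, List.drop_eq_getElem_cons hjn']
        rfl
      by_cases hstop : 0 ≤ maxsplit ∧ (res.length : Int) = maxsplit + 1
      · rw [if_pos hstop, if_pos hstop]
      · rw [if_neg hstop, if_neg hstop]
        by_cases htest : [cs[j]] = sepL
        · rw [if_pos htest, if_pos (by rw [hslice]; exact htest), hL', hcast]
          exact ih (j + 1) _ _ (by omega) (by omega)
        · rw [if_neg htest, if_neg (by rw [hslice]; exact htest), hcast]
          exact ih (j + 1) _ _ (by omega) (by omega)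

-- A side: the general separator loop computes pvRhs ------------------------
lemma aMany_inv (cs sepL : List Char) (maxsplit : Int) :
    ∀ f j (res : List (List Char)) (s : Nat), cs.length - j ≤ f → j ≤ cs.length → s ≤ cs.length →
      (0 ≤ maxsplit → res.length ≤ (maxsplit + 1).toNat) →
      aLoopMany cs sepL maxsplit (PySem.List.enumerate (cs.drop j) (j : Int)) res (s : Int) =
        res ++ pvRhs cs sepL f j s
          (if 0 ≤ maxsplit then some ((maxsplit + 1).toNat - res.length) else none) := by
  intro f
  induction f with
  | zero =>
    intro j res s hf hj hs hb
    rw [List.drop_eq_nil_of_le (by omega), PySem.List.enumerate_nil,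
      aMany_base cs sepL maxsplit res s hs]
    simp [pvRhs]
  | succ f ih =>
    intro j res s hf hj hs hb
    by_cases hjn : cs.length ≤ j
    · rw [List.drop_eq_nil_of_le hjn, PySem.List.enumerate_nil,
        aMany_base cs sepL maxsplit res s hs, pvRhs_ge cs sepL j s hjn]
    · have hjn' : j < cs.length := by omega
      rw [List.drop_eq_getElem_cons hjn', PySem.List.enumerate_cons]
      simp only [aLoopMany]
      have hcast : (j : Int) + 1 = ((j + 1 : Nat) : Int) := by push_cast; ring
      by_cases hm : 0 ≤ maxsplit
      · simp only [if_pos hm]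
        have hk : ((maxsplit + 1).toNat : Int) = maxsplit + 1 := Int.toNat_of_nonneg (by omega)
        by_cases hfull : (res.length : Int) = maxsplit + 1
        · rw [if_pos ⟨hm, hfull⟩]
          have hz : (maxsplit + 1).toNat - res.length = 0 := by omega
          rw [hz]
          conv_rhs => rw [pvRhs]
          rw [if_neg (by omega : ¬ cs.length ≤ j), if_pos rfl]
          simp
        · rw [if_neg (by rintro ⟨_, h⟩; exact hfull h)]
          have hlt : res.length < (maxsplit + 1).toNat := by
            have h1 := hb hm
            omega
          have hne : ¬ (some ((maxsplit + 1).toNat - res.length) = some 0) := by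
            simp
            omega
          by_cases htest : PySem.List.slice cs (some (j : Int)) (some ((j : Int) + (sepL.length : Int))) = sepL
          · rw [if_pos htest]
            have hpred : pvPred cs sepL j = true := (pvTest_iff cs sepL j).mp htest
            have hjL : j + sepL.length ≤ cs.length := by
              have hpre : sepL <+: cs.drop j := by simpa [pvPred] using hpred
              have := hpre.length_le
              simp only [List.length_drop] at this
              omega
            have hslice : PySem.List.slice cs (some (s : Int)) (some (j : Int)) = pvS cs s j :=
              PySem.List.slice_natCast cs s j
            have hcast2 : (j : Int) + (sepL.length : Int) = ((j + sepL.length : Nat) : Int) := by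
              push_cast; ring
            have IH := ih (j + 1) (res ++ [pvS cs s j]) (j + sepL.length) (by omega) (by omega)
              hjL (fun _ => by simp; omega)
            simp only [if_pos hm, List.length_append, List.length_cons, List.length_nil] at IH
            rw [hslice, hcast2, hcast, IH]
            conv_rhs => rw [pvRhs]
            rw [if_neg (by omega : ¬ cs.length ≤ j), if_neg hne, if_pos hpred, Option.map_some,
              Nat.sub_sub]
            simp
          · rw [if_neg htest]
            have hpred : pvPred cs sepL j = false := by
              cases h : pvPred cs sepL j
              · rfl
              · exact absurd ((pvTest_iff cs sepL j).mpr h) htest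
            have IH := ih (j + 1) res s (by omega) (by omega) hs hb
            simp only [if_pos hm] at IH
            rw [hcast, IH]
            conv_rhs => rw [pvRhs]
            rw [if_neg (by omega : ¬ cs.length ≤ j), if_neg hne, if_neg (by simp [hpred])]
      · simp only [if_neg hm]
        rw [if_neg (by rintro ⟨h, _⟩; exact hm h)]
        have hne : ¬ ((none : Option Nat) = some 0) := by simp
        by_cases htest : PySem.List.slice cs (some (j : Int)) (some ((j : Int) + (sepL.length : Int))) = sepL
        · rw [if_pos htest]
          have hpred : pvPred cs sepL j = true := (pvTest_iff cs sepL j).mp htest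
          have hjL : j + sepL.length ≤ cs.length := by
            have hpre : sepL <+: cs.drop j := by simpa [pvPred] using hpred
            have := hpre.length_le
            simp only [List.length_drop] at this
            omega
          have hslice : PySem.List.slice cs (some (s : Int)) (some (j : Int)) = pvS cs s j :=
            PySem.List.slice_natCast cs s j
          have hcast2 : (j : Int) + (sepL.length : Int) = ((j + sepL.length : Nat) : Int) := by
            push_cast; ring
          have IH := ih (j + 1) (res ++ [pvS cs s j]) (j + sepL.length) (by omega) (by omega)
            hjL (fun h => absurd h hm)
          simp only [if_neg hm] at IH
          rw [hslice, hcast2, hcast, IH]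
          conv_rhs => rw [pvRhs]
          rw [if_neg (by omega : ¬ cs.length ≤ j), if_neg hne, if_pos hpred]
          simp
        · rw [if_neg htest]
          have hpred : pvPred cs sepL j = false := by
            cases h : pvPred cs sepL j
            · rfl
            · exact absurd ((pvTest_iff cs sepL j).mpr h) htest
          have IH := ih (j + 1) res s (by omega) (by omega) hs hb
          simp only [if_neg hm] at IH
          rw [hcast, IH]
          conv_rhs => rw [pvRhs]
          rw [if_neg (by omega : ¬ cs.length ≤ j), if_neg hne, if_neg (by simp [hpred])]

-- pvRhs without budget is emit-all ----------------------------------------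
lemma pvRhs_none (cs sepL : List Char) :
    ∀ f j s, cs.length - j ≤ f → j ≤ cs.length →
      pvRhs cs sepL f j s none = pvAll cs sepL (pvMsFrom cs sepL j) s := by
  intro f
  induction f with
  | zero =>
    intro j s hf hj
    rw [pvMsFrom_ge cs sepL j (by omega)]
    rfl
  | succ f ih =>
    intro j s hf hj
    by_cases hjn : cs.length ≤ j
    · rw [pvMsFrom_ge cs sepL j hjn, pvRhs_ge cs sepL j s hjn]
      rfl
    · have hjn' : j < cs.length := by omega
      conv_lhs => rw [pvRhs]
      rw [if_neg (by omega : ¬ cs.length ≤ j), if_neg (by simp : ¬ ((none : Option Nat) = some 0))]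
      cases h : pvPred cs sepL j
      · rw [if_neg (by simp), ih (j + 1) s (by omega) (by omega),
          pvMsFrom_lt cs sepL j hjn', h]
        simp
      · rw [if_pos rfl, Option.map_none, ih (j + 1) (j + sepL.length) (by omega) (by omega),
          pvMsFrom_lt cs sepL j hjn', h]
        simp [pvAll]

-- pvRhs with budget m is plain truncation (outside the D_ corner) ----------
lemma pvRhs_some (cs sepL : List Char) :
    ∀ f j s m, cs.length - j ≤ f →
      (m = 0 → (cs.length ≤ j → cs.length ≤ s)) →
      (sepL = [] → 1 ≤ m → j + m ≠ cs.length) →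
      pvRhs cs sepL f j s (some m) = (pvRhs cs sepL f j s none).take m := by
  intro f
  induction f with
  | zero =>
    intro j s m hf hg hn
    simp only [pvRhs]
    cases m with
    | zero =>
      have hs : cs.length ≤ s := hg rfl (by omega)
      unfold pvTail
      rw [if_neg (by omega : ¬ s < cs.length)]
      rfl
    | succ m =>
      unfold pvTail
      split
      · simp
      · simp
  | succ f ih =>
    intro j s m hf hg hn
    by_cases hjn : cs.length ≤ j
    · rw [pvRhs_ge cs sepL j s hjn, pvRhs_ge cs sepL j s hjn]
      cases m with
      | zero =>
        have hs : cs.length ≤ s := hg rfl hjn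
        unfold pvTail
        rw [if_neg (by omega : ¬ s < cs.length)]
        rfl
      | succ m =>
        unfold pvTail
        split
        · simp
        · simp
    · have hjn' : j < cs.length := by omega
      cases m with
      | zero =>
        conv_lhs => rw [pvRhs]
        rw [if_neg (by omega : ¬ cs.length ≤ j), if_pos rfl]
        simp
      | succ m =>
        conv_lhs => rw [pvRhs]
        conv_rhs => rw [pvRhs]
        rw [if_neg (by omega : ¬ cs.length ≤ j),
          if_neg (by simp : ¬ ((some (m + 1) : Option Nat) = some 0)),
          if_neg (by omega : ¬ cs.length ≤ j),
          if_neg (by simp : ¬ ((none : Option Nat) = some 0))]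
        cases h : pvPred cs sepL j
        · rw [if_neg (by simp), if_neg (by simp)]
          have hsep : sepL ≠ [] := by
            intro hx
            rw [hx] at h
            simp [pvPred] at h
          exact ih (j + 1) s (m + 1) (by omega) (by omega)
            (fun hx => absurd hx hsep)
        · rw [if_pos rfl, if_pos rfl, Option.map_some, Option.map_none, Nat.add_sub_cancel,
            List.take_succ_cons]
          rw [ih (j + 1) (j + sepL.length) m (by omega)
            (by
              intro hm0 hlen
              subst hm0
              by_cases hL : sepL = []
              · have := hn hL (by omega)
                omega
              · have hL1 : 1 ≤ sepL.length := by
                  have : sepL.length ≠ 0 := fun hz => hL (List.eq_nil_of_length_eq_zero hz)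
                  omega
                omega)
            (by
              intro hL hm1
              have h2 := hn hL (by omega)
              omega)]

-- for sepL = [] with budget exactly reaching the end, A emits everything ---
lemma pvRhs_some_full (cs : List Char) :
    ∀ f j s m, j + m = cs.length →
      pvRhs cs [] f j s (some m) = pvRhs cs [] f j s none := by
  intro f
  induction f with
  | zero =>
    intro j s m hm
    rfl
  | succ f ih =>
    intro j s m hm
    by_cases hjn : cs.length ≤ j
    · rw [pvRhs_ge cs [] j s hjn, pvRhs_ge cs [] j s hjn]
    · have hm1 : 1 ≤ m := by omega
      conv_lhs => rw [pvRhs]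
      conv_rhs => rw [pvRhs]
      rw [if_neg hjn, if_neg hjn,
        if_neg (by simp; omega : ¬ ((some m : Option Nat) = some 0)),
        if_neg (by simp : ¬ ((none : Option Nat) = some 0))]
      have hp : pvPred cs [] j = true := by simp [pvPred]
      rw [if_pos hp, if_pos hp, Option.map_some, Option.map_none]
      have : pvRhs cs [] f (j + 1) (j + ([] : List Char).length) (some (m - 1)) =
          pvRhs cs [] f (j + 1) (j + ([] : List Char).length) none :=
        ih (j + 1) (j + ([] : List Char).length) (m - 1) (by omega)
      rw [this]

-- B side: the find loop returns exactly the match positions ----------------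
lemma bFindLoop_inv (string sep : String) (hsep : sep.toList ≠ []) :
    ∀ fuel (i : Nat) acc, string.toList.length - i < fuel → i ≤ string.toList.length →
      bFindLoop string sep fuel (i : Int) acc =
        acc ++ (pvMsFrom string.toList sep.toList i).map (fun (p : Nat) => (p : Int)) := by
  intro fuel
  induction fuel with
  | zero =>
    intro i acc hf hi
    omega
  | succ fuel ih =>
    intro i acc hf hi
    simp only [bFindLoop, PySem.Str.findFrom_eq]
    by_cases hq : PySem.Chars.findFrom string.toList sep.toList (i : Int) none = -1
    · rw [if_pos hq]
      have hni : ¬ sep.toList <:+: string.toList.drop i :=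
        (PySem.Chars.findFrom_natCast_eq_neg_one_iff string.toList sep.toList i hi).mp hq
      have hnil : pvMsFrom string.toList sep.toList i = [] := by
        apply pvMsFrom_nil_of_no_match string.toList sep.toList
          (string.toList.length - i) i (le_refl _)
        intro t ht1 ht2
        cases h : pvPred string.toList sep.toList t
        · rfl
        · exfalso
          apply hni
          have hpre : sep.toList <+: string.toList.drop t := by simpa [pvPred] using h
          have hdd : string.toList.drop t = (string.toList.drop i).drop (t - i) := by
            rw [List.drop_drop]
            congr 1
            omega
          rw [hdd] at hpre
          exact hpre.isInfix.trans (List.drop_suffix _ _).isInfix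
      rw [hnil]
      simp
    · rw [if_neg hq]
      obtain ⟨hip, hpre, hmin⟩ :=
        PySem.Chars.findFrom_natCast_spec string.toList sep.toList i hi hq
      set q := PySem.Chars.findFrom string.toList sep.toList (i : Int) none with hqdef
      have hq0 : (0 : Int) ≤ q := le_trans (by positivity) hip
      have hqp : q = ((q.toNat : Nat) : Int) := (Int.toNat_of_nonneg hq0).symm
      set p := q.toNat with hpdef
      have hiplt : i ≤ p := by
        rw [hqp] at hip
        exact_mod_cast hip
      have hL1 : 1 ≤ sep.toList.length := by
        have : sep.toList.length ≠ 0 := by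
          intro h
          exact hsep (List.eq_nil_of_length_eq_zero h)
        omega
      have hlen' := hpre.length_le
      simp only [List.length_drop] at hlen'
      have hpn : p < string.toList.length := by omega
      have hplen : p + sep.toList.length ≤ string.toList.length := by omega
      have hskip : pvMsFrom string.toList sep.toList i = pvMsFrom string.toList sep.toList p := by
        apply pvMsFrom_skip string.toList sep.toList (p - i) i p (le_refl _) hiplt
        intro t ht1 ht2
        cases h : pvPred string.toList sep.toList t
        · rfl
        · exact absurd (by simpa [pvPred] using h) (hmin t ht1 (by omega))
      have hcons : pvMsFrom string.toList sep.toList p =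
          p :: pvMsFrom string.toList sep.toList (p + 1) := by
        rw [pvMsFrom_lt string.toList sep.toList p hpn]
        have hpprd : pvPred string.toList sep.toList p = true := by
          simpa [pvPred] using hpre
        rw [hpprd]
        rfl
      have hcast : q + 1 = ((p + 1 : Nat) : Int) := by rw [hqp]; push_cast; ring
      rw [hcast, ih (p + 1) (acc ++ [q]) (by omega) (by omega), hskip, hcons]
      simp [hqp]

-- B side: the emit loop computes pvPieces and pvFinal ----------------------
lemma bPieces_inv (cs sepL : List Char) :
    ∀ ps (pieces : List (List Char)) (s : Nat),
      bPieces cs (sepL.length : Int) (ps.map (fun (p : Nat) => (p : Int))) pieces (s : Int) =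
        (pieces ++ pvPieces cs sepL ps s, ((pvFinal sepL ps s : Nat) : Int)) := by
  intro ps
  induction ps with
  | nil =>
    intro pieces s
    simp [bPieces, pvPieces, pvFinal]
  | cons p ps ih =>
    intro pieces s
    simp only [List.map_cons, bPieces, PySem.List.slice_natCast]
    have hcast : (p : Int) + (sepL.length : Int) = ((p + sepL.length : Nat) : Int) := by
      push_cast; ring
    rw [hcast, ih (pieces ++ [List.take (p - s) (List.drop s cs)]) (p + sepL.length)]
    simp [pvPieces, pvFinal, pvS]

lemma pvAll_decomp (cs sepL : List Char) :
    ∀ ps s, pvAll cs sepL ps s = pvPieces cs sepL ps s ++ pvTail cs (pvFinal sepL ps s) := by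
  intro ps
  induction ps with
  | nil => intro s; rfl
  | cons p ps ih => intro s; simp [pvAll, pvPieces, pvFinal, ih]

lemma pvFinal_le (cs sepL : List Char) :
    ∀ ps s, s ≤ cs.length → (∀ p ∈ ps, p + sepL.length ≤ cs.length) →
      pvFinal sepL ps s ≤ cs.length := by
  intro ps
  induction ps with
  | nil => intro s hs _; exact hs
  | cons p ps ih =>
    intro s hs h
    exact ih (p + sepL.length) (h p (by simp)) (fun x hx => h x (by simp [hx]))

-- A side: the whitespace loop computes pvRhsN ------------------------------
lemma aNone_inv (cs : List Char) (maxsplit : Int) :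
    ∀ f j (res : List (List Char)) (s : Nat), cs.length - j ≤ f → s ≤ j → j ≤ cs.length →
      (0 ≤ maxsplit → res.length ≤ (maxsplit + 1).toNat) →
      aLoopNone cs maxsplit (PySem.List.enumerate (cs.drop j) (j : Int)) res (s : Int) ((j : Int) - (s : Int)) =
        res ++ pvRhsN cs f j s
          (if 0 ≤ maxsplit then some ((maxsplit + 1).toNat - res.length) else none) := by
  intro f
  induction f with
  | zero =>
    intro j res s hf hsj hj hb
    rw [List.drop_eq_nil_of_le (by omega), PySem.List.enumerate_nil,
      aNone_base cs maxsplit res s _ (by omega)]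
    simp [pvRhsN]
  | succ f ih =>
    intro j res s hf hsj hj hb
    by_cases hjn : cs.length ≤ j
    · rw [List.drop_eq_nil_of_le hjn, PySem.List.enumerate_nil,
        aNone_base cs maxsplit res s _ (by omega), pvRhsN_ge cs j s hjn]
    · have hjn' : j < cs.length := by omega
      rw [List.drop_eq_getElem_cons hjn', PySem.List.enumerate_cons]
      simp only [aLoopNone]
      have hcast : (j : Int) + 1 = ((j + 1 : Nat) : Int) := by push_cast; ring
      have hgetD : cs.getD j ' ' = cs[j] := List.getD_eq_getElem cs ' ' hjn'
      have hc0 : ((j + 1 : Nat) : Int) - ((j + 1 : Nat) : Int) = 0 := by ring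
      by_cases hm : 0 ≤ maxsplit
      · simp only [if_pos hm]
        have hk : ((maxsplit + 1).toNat : Int) = maxsplit + 1 := Int.toNat_of_nonneg (by omega)
        by_cases hfull : (res.length : Int) = maxsplit + 1
        · rw [if_pos ⟨hm, hfull⟩]
          have hz : (maxsplit + 1).toNat - res.length = 0 := by omega
          rw [hz]
          conv_rhs => rw [pvRhsN]
          rw [if_neg (by omega : ¬ cs.length ≤ j), if_pos rfl]
          simp
        · rw [if_neg (by rintro ⟨_, h⟩; exact hfull h)]
          have hlt : res.length < (maxsplit + 1).toNat := by
            have h1 := hb hm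
            omega
          have hne : ¬ (some ((maxsplit + 1).toNat - res.length) = some 0) := by
            simp
            omega
          by_cases hsp : PySem.Chars.isspace cs[j] = true
          · rw [if_pos hsp]
            by_cases hslt : s < j
            · rw [if_pos (by omega : ¬ ((j : Int) - (s : Int) = 0))]
              have hsl : (j : Int) - ((j : Int) - (s : Int)) = ((s : Nat) : Int) := by ring
              rw [hsl, PySem.List.slice_natCast]
              have IH := ih (j + 1) (res ++ [List.take (j - s) (List.drop s cs)]) (j + 1)
                (by omega) (le_refl _) (by omega) (fun _ => by simp; omega)
              simp only [if_pos hm, List.length_append, List.length_cons, List.length_nil] at IH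
              rw [hc0] at IH
              rw [hcast, IH]
              conv_rhs => rw [pvRhsN]
              rw [if_neg (by omega : ¬ cs.length ≤ j), if_neg hne, hgetD, if_pos hsp,
                if_pos hslt, Option.map_some, Nat.sub_sub]
              simp [pvS]
            · rw [if_neg (by omega : ¬ ¬ ((j : Int) - (s : Int) = 0))]
              have IH := ih (j + 1) res (j + 1) (by omega) (le_refl _) (by omega) hb
              simp only [if_pos hm] at IH
              rw [hc0] at IH
              rw [hcast, IH]
              conv_rhs => rw [pvRhsN]
              rw [if_neg (by omega : ¬ cs.length ≤ j), if_neg hne, hgetD, if_pos hsp,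
                if_neg (by omega : ¬ s < j)]
          · rw [if_neg hsp]
            have hcnt : (j : Int) - (s : Int) + 1 = ((j + 1 : Nat) : Int) - ((s : Nat) : Int) := by
              push_cast; ring
            have IH := ih (j + 1) res s (by omega) (by omega) (by omega) hb
            simp only [if_pos hm] at IH
            rw [hcast, hcnt, IH]
            conv_rhs => rw [pvRhsN]
            rw [if_neg (by omega : ¬ cs.length ≤ j), if_neg hne, hgetD, if_neg hsp]
      · simp only [if_neg hm]
        rw [if_neg (by rintro ⟨h, _⟩; exact hm h)]
        have hne : ¬ ((none : Option Nat) = some 0) := by simp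
        by_cases hsp : PySem.Chars.isspace cs[j] = true
        · rw [if_pos hsp]
          by_cases hslt : s < j
          · rw [if_pos (by omega : ¬ ((j : Int) - (s : Int) = 0))]
            have hsl : (j : Int) - ((j : Int) - (s : Int)) = ((s : Nat) : Int) := by ring
            rw [hsl, PySem.List.slice_natCast]
            have IH := ih (j + 1) (res ++ [List.take (j - s) (List.drop s cs)]) (j + 1)
              (by omega) (le_refl _) (by omega) (fun h => absurd h hm)
            simp only [if_neg hm] at IH
            rw [hc0] at IH
            rw [hcast, IH]
            conv_rhs => rw [pvRhsN]
            rw [if_neg (by omega : ¬ cs.length ≤ j), if_neg hne, hgetD, if_pos hsp,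
              if_pos hslt]
            simp [pvS]
          · rw [if_neg (by omega : ¬ ¬ ((j : Int) - (s : Int) = 0))]
            have IH := ih (j + 1) res (j + 1) (by omega) (le_refl _) (by omega) hb
            simp only [if_neg hm] at IH
            rw [hc0] at IH
            rw [hcast, IH]
            conv_rhs => rw [pvRhsN]
            rw [if_neg (by omega : ¬ cs.length ≤ j), if_neg hne, hgetD, if_pos hsp,
              if_neg (by omega : ¬ s < j)]
        · rw [if_neg hsp]
          have hcnt : (j : Int) - (s : Int) + 1 = ((j + 1 : Nat) : Int) - ((s : Nat) : Int) := by
            push_cast; ring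
          have IH := ih (j + 1) res s (by omega) (by omega) (by omega) hb
          simp only [if_neg hm] at IH
          rw [hcast, hcnt, IH]
          conv_rhs => rw [pvRhsN]
          rw [if_neg (by omega : ¬ cs.length ≤ j), if_neg hne, hgetD, if_neg hsp]

-- pvRhsN without budget is str.split() ------------------------------------
lemma pvRhsN_go (cs : List Char) :
    ∀ f j s (acc : List (List Char)), cs.length - j ≤ f → s ≤ j → j ≤ cs.length →
      (∀ i, s ≤ i → i < j → PySem.Chars.isspace (cs.getD i ' ') = false) →
      PySem.Chars.split₀.go (cs.drop j) (pvS cs s j).reverse acc =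
        acc.reverse ++ pvRhsN cs f j s none := by
  intro f
  induction f with
  | zero =>
    intro j s acc hf hsj hj _
    have hje : j = cs.length := by omega
    subst hje
    rw [List.drop_length]
    simp only [PySem.Chars.split₀.go]
    by_cases hs : s < cs.length
    · have hne : (pvS cs s cs.length).reverse.isEmpty = false := by
        rw [pvS_to_end cs s (by omega)]
        simp [List.drop_eq_nil_iff]
        omega
      rw [hne]
      simp [pvRhsN, pvTail, hs]
    · rw [pvS_to_end cs s (by omega), List.drop_eq_nil_of_le (by omega)]
      simp [pvRhsN, pvTail, hs]
  | succ f ih =>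
    intro j s acc hf hsj hj hns
    by_cases hjn : cs.length ≤ j
    · have hje : j = cs.length := by omega
      subst hje
      rw [List.drop_length]
      simp only [PySem.Chars.split₀.go]
      by_cases hs : s < cs.length
      · have hne : (pvS cs s cs.length).reverse.isEmpty = false := by
          rw [pvS_to_end cs s (by omega)]
          simp [List.drop_eq_nil_iff]
          omega
        rw [hne]
        simp [pvRhsN_ge cs cs.length s (le_refl _), pvTail, hs]
      · rw [pvS_to_end cs s (by omega), List.drop_eq_nil_of_le (by omega)]
        simp [pvRhsN_ge cs cs.length s (le_refl _), pvTail, hs]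
    · have hjn' : j < cs.length := by omega
      rw [List.drop_eq_getElem_cons hjn']
      simp only [PySem.Chars.split₀.go]
      have hgetD : cs.getD j ' ' = cs[j] := List.getD_eq_getElem cs ' ' hjn'
      by_cases hsp : PySem.Chars.isspace cs[j] = true
      · rw [if_pos hsp]
        by_cases hslt : s < j
        · have hne : (pvS cs s j).reverse.isEmpty = false := by
            simp [pvS, List.take_eq_nil_iff, List.drop_eq_nil_iff]
            omega
          rw [hne]
          simp only [Bool.false_eq_true, if_false]
          have IH := ih (j + 1) (j + 1) ((pvS cs s j).reverse.reverse :: acc) (by omega)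
            (le_refl _) (by omega) (fun i h1 h2 => by omega)
          simp only [pvS_nil, List.reverse_nil] at IH
          rw [IH]
          conv_rhs => rw [pvRhsN]
          rw [if_neg (by omega : ¬ cs.length ≤ j),
            if_neg (by simp : ¬ ((none : Option Nat) = some 0)), hgetD, if_pos hsp,
            if_pos hslt]
          simp
        · have hse : pvS cs s j = [] := by
            have : s = j := by omega
            rw [this, pvS_nil]
          rw [hse]
          simp only [List.reverse_nil, List.isEmpty_nil, if_true]
          have IH := ih (j + 1) (j + 1) acc (by omega) (le_refl _) (by omega)
            (fun i h1 h2 => by omega)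
          simp only [pvS_nil, List.reverse_nil] at IH
          rw [IH]
          conv_rhs => rw [pvRhsN]
          rw [if_neg (by omega : ¬ cs.length ≤ j),
            if_neg (by simp : ¬ ((none : Option Nat) = some 0)), hgetD, if_pos hsp,
            if_neg (by omega : ¬ s < j)]
      · rw [if_neg hsp]
        have hsnoc : cs[j] :: (pvS cs s j).reverse = (pvS cs s (j + 1)).reverse := by
          rw [pvS_snoc cs s j hsj hjn', hgetD.symm]
          simp
        rw [hsnoc,
          ih (j + 1) s acc (by omega) (by omega) (by omega)
            (fun i h1 h2 => by
              by_cases hij : i < j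
              · exact hns i h1 hij
              · have hieq : i = j := by omega
                rw [hieq, hgetD]
                cases h : PySem.Chars.isspace cs[j]
                · rfl
                · exact absurd h hsp)]
        conv_rhs => rw [pvRhsN]
        rw [if_neg (by omega : ¬ cs.length ≤ j),
          if_neg (by simp : ¬ ((none : Option Nat) = some 0)), hgetD, if_neg hsp]

-- pvRhsN with budget m is plain truncation ---------------------------------
lemma pvRhsN_some (cs : List Char) :
    ∀ f j s m, cs.length - j ≤ f → s ≤ j → j ≤ cs.length → (m = 0 → s = j) →
      pvRhsN cs f j s (some m) = (pvRhsN cs f j s none).take m := by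
  intro f
  induction f with
  | zero =>
    intro j s m hf hsj hj hm0
    cases m with
    | zero =>
      have : s = j := hm0 rfl
      simp only [pvRhsN, pvTail]
      rw [if_neg (by omega : ¬ s < cs.length)]
      rfl
    | succ m =>
      simp only [pvRhsN, pvTail]
      split
      · simp
      · simp
  | succ f ih =>
    intro j s m hf hsj hj hm0
    by_cases hjn : cs.length ≤ j
    · rw [pvRhsN_ge cs j s hjn, pvRhsN_ge cs j s hjn]
      cases m with
      | zero =>
        have : s = j := hm0 rfl
        simp only [pvTail]
        rw [if_neg (by omega : ¬ s < cs.length)]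
        rfl
      | succ m =>
        simp only [pvTail]
        split
        · simp
        · simp
    · have hjn' : j < cs.length := by omega
      cases m with
      | zero =>
        conv_lhs => rw [pvRhsN]
        rw [if_neg (by omega : ¬ cs.length ≤ j), if_pos rfl]
        simp
      | succ m =>
        conv_lhs => rw [pvRhsN]
        conv_rhs => rw [pvRhsN]
        rw [if_neg (by omega : ¬ cs.length ≤ j),
          if_neg (by simp : ¬ ((some (m + 1) : Option Nat) = some 0)),
          if_neg (by omega : ¬ cs.length ≤ j),
          if_neg (by simp : ¬ ((none : Option Nat) = some 0))]
        by_cases hsp : PySem.Chars.isspace (cs.getD j ' ') = true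
        · rw [if_pos hsp, if_pos hsp]
          by_cases hslt : s < j
          · rw [if_pos hslt, if_pos hslt, Option.map_some, Option.map_none,
              Nat.add_sub_cancel, List.take_succ_cons,
              ih (j + 1) (j + 1) m (by omega) (le_refl _) (by omega) (fun _ => rfl)]
          · rw [if_neg hslt, if_neg hslt]
            exact ih (j + 1) (j + 1) (m + 1) (by omega) (le_refl _) (by omega) (by omega)
        · rw [if_neg hsp, if_neg hsp]
          exact ih (j + 1) s (m + 1) (by omega) (by omega) (by omega) (by omega)

-- Str.split₀ through Chars ------------------------------------------------
lemma str_split₀_eq (string : String) :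
    PySem.Str.split₀ string = (PySem.Chars.split₀ string.toList).map String.ofList := by
  rw [← PySem.Str.split₀_map_toList, List.map_map]
  have : (String.ofList ∘ String.toList) = id := by
    funext x
    simp [String.ofList_toList]
  rw [this, List.map_id]

lemma chars_split₀_eq (cs : List Char) :
    PySem.Chars.split₀ cs = pvRhsN cs cs.length 0 0 none := by
  have h := pvRhsN_go cs cs.length 0 0 [] (by omega) (le_refl 0) (by omega) (by omega)
  rw [pvS_nil] at h
  simpa [PySem.Chars.split₀] using h

-- shared reductions used by both the equivalence and the tight theorem -----
-- A's separator branch equals pvRhs with its budget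
lemma a_sep_eq (string sep : String) (maxsplit : Int) :
    (if sep.toList.length = 1 then
      aLoopOne string.toList sep.toList maxsplit (PySem.List.enumerate string.toList) [] 0
    else
      aLoopMany string.toList sep.toList maxsplit (PySem.List.enumerate string.toList) [] 0) =
      pvRhs string.toList sep.toList string.toList.length 0 0
        (if 0 ≤ maxsplit then some ((maxsplit + 1).toNat) else none) := by
  have hAmany :
      aLoopMany string.toList sep.toList maxsplit (PySem.List.enumerate string.toList) [] 0 =
        pvRhs string.toList sep.toList string.toList.length 0 0
          (if 0 ≤ maxsplit then some ((maxsplit + 1).toNat) else none) := by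
    have hinv := aMany_inv string.toList sep.toList maxsplit string.toList.length 0 [] 0
      (by omega) (by omega) (by omega) (fun _ => by simp)
    simp only [Nat.cast_zero, List.nil_append, List.drop_zero, List.length_nil,
      Nat.sub_zero] at hinv
    exact hinv
  by_cases hL1 : sep.toList.length = 1
  · rw [if_pos hL1]
    have hone := aOne_eq_aMany string.toList sep.toList maxsplit hL1 string.toList.length 0
      [] 0 (by omega) (by omega)
    simp only [Nat.cast_zero, List.drop_zero] at hone
    rw [hone]
    exact hAmany
  · rw [if_neg hL1]
    exact hAmany

-- B's match list equals pvMsFrom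
lemma b_ms_eq (string sep : String) :
    (if (sep.toList.length : Int) = 0 then
        PySem.List.pyRange 0 (string.toList.length : Int) 1
      else bFindLoop string sep (string.toList.length + 2) 0 []) =
    (pvMsFrom string.toList sep.toList 0).map (fun (p : Nat) => (p : Int)) := by
  by_cases hL0 : sep.toList.length = 0
  · rw [if_pos (by exact_mod_cast hL0)]
    have hsepnil : sep.toList = [] := List.eq_nil_of_length_eq_zero hL0
    rw [PySem.List.pyRange_zero_natCast]
    unfold pvMsFrom
    have hfalt : List.filter (pvPred string.toList sep.toList)
        (List.range' 0 (string.toList.length - 0)) =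
        List.range' 0 (string.toList.length - 0) := by
      apply List.filter_eq_self.mpr
      intro a _
      simp [pvPred, hsepnil]
    rw [hfalt, Nat.sub_zero, List.range_eq_range']
  · rw [if_neg (by exact_mod_cast hL0)]
    have hfl := bFindLoop_inv string sep (fun h => hL0 (by rw [h]; rfl))
      (string.toList.length + 2) 0 [] (by omega) (by omega)
    simp only [Nat.cast_zero, List.nil_append] at hfl
    exact hfl

-- B's piece list (before the final slice) equals pvAll over pvMsFrom
lemma b_pieces_eq (string sep : String) :
    (if (bPieces string.toList (sep.toList.length : Int)
          ((pvMsFrom string.toList sep.toList 0).map (fun (p : Nat) => (p : Int))) [] 0).2 <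
        (string.toList.length : Int) then
      (bPieces string.toList (sep.toList.length : Int)
          ((pvMsFrom string.toList sep.toList 0).map (fun (p : Nat) => (p : Int))) [] 0).1 ++
        [PySem.List.slice string.toList
          (some (bPieces string.toList (sep.toList.length : Int)
            ((pvMsFrom string.toList sep.toList 0).map (fun (p : Nat) => (p : Int))) [] 0).2) none]
    else
      (bPieces string.toList (sep.toList.length : Int)
          ((pvMsFrom string.toList sep.toList 0).map (fun (p : Nat) => (p : Int))) [] 0).1) =
    pvAll string.toList sep.toList (pvMsFrom string.toList sep.toList 0) 0 := by
  have hbp := bPieces_inv string.toList sep.toList (pvMsFrom string.toList sep.toList 0) [] 0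
  simp only [Nat.cast_zero, List.nil_append] at hbp
  have hmem : ∀ p ∈ pvMsFrom string.toList sep.toList 0,
      p + sep.toList.length ≤ string.toList.length :=
    fun p hp => (pvMsFrom_mem _ _ 0 p hp).2.2.1
  have hfin : pvFinal sep.toList (pvMsFrom string.toList sep.toList 0) 0 ≤ string.toList.length :=
    pvFinal_le _ _ _ 0 (by omega) hmem
  rw [hbp]
  dsimp only
  rw [pvAll_decomp]
  by_cases hfl2 : pvFinal sep.toList (pvMsFrom string.toList sep.toList 0) 0 < string.toList.length
  · rw [if_pos (by exact_mod_cast hfl2),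
      PySem.List.slice_from string.toList (by positivity), Int.toNat_natCast]
    unfold pvTail
    rw [if_pos hfl2, pvS_to_end _ _ hfin]
  · rw [if_neg (by exact_mod_cast hfl2)]
    unfold pvTail
    rw [if_neg hfl2, List.append_nil]

-- D_ tightness helpers -----------------------------------------------------
lemma pvPieces_length (cs sepL : List Char) :
    ∀ ps s, (pvPieces cs sepL ps s).length = ps.length := by
  intro ps
  induction ps with
  | nil => intro s; rfl
  | cons p ps ih => intro s; simp [pvPieces, ih]

lemma pvFinal_nil_sep (ps : List Nat) :
    ∀ s, pvFinal [] ps s = ps.getLastD s := by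
  induction ps with
  | nil => intro s; rfl
  | cons p ps ih =>
    intro s
    simp only [pvFinal, List.length_nil, Nat.add_zero, ih, List.getLastD_cons]

lemma getLastD_range' : ∀ n s d : Nat, (List.range' s n).getLastD d = if n = 0 then d else s + n - 1 := by
  intro n
  induction n with
  | zero => intro s d; rfl
  | succ n ih =>
    intro s d
    rw [List.range'_succ, List.getLastD_cons, ih (s + 1) s]
    by_cases hn : n = 0
    · simp [hn]
    · rw [if_neg hn, if_neg (by omega)]
      omega

lemma msFrom_nil_sep (cs : List Char) :
    pvMsFrom cs [] 0 = List.range' 0 cs.length := by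
  unfold pvMsFrom
  rw [Nat.sub_zero]
  apply List.filter_eq_self.mpr
  intro a _
  simp [pvPred]

-- ===== VERDICT (by name: the statement is the Claim_ definition above) =====
theorem split_imitate_spec : Claim_unchanged_split_imitate := by
  unfold Claim_unchanged_split_imitate
  intro string separator maxsplit _hdom
  unfold Spec_split_imitate split_imitate split_imitate_alt
  intro hnD
  cases separator with
  | none =>
    simp only
    have hinv := aNone_inv string.toList maxsplit string.toList.length 0 [] 0 (by omega)
      (le_refl 0) (by omega) (fun _ => by simp)
    simp only [Nat.cast_zero, sub_self, List.nil_append, List.drop_zero,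
      List.length_nil, Nat.sub_zero] at hinv
    by_cases hm : maxsplit < 0
    · rw [if_pos hm, hinv, if_neg (by omega)]
      rw [str_split₀_eq, chars_split₀_eq]
    · rw [if_neg hm, hinv, if_pos (by omega)]
      rw [PySem.List.slice_to _ (by omega : (0 : Int) ≤ maxsplit + 1)]
      rw [str_split₀_eq, chars_split₀_eq]
      rw [pvRhsN_some string.toList string.toList.length 0 0 _ (by omega) (le_refl 0) (by omega)
        (by omega)]
      rw [List.map_take]
  | some sep =>
    simp only
    rw [← apply_ite (List.map String.ofList), a_sep_eq string sep maxsplit,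
      b_ms_eq string sep, b_pieces_eq string sep]
    by_cases hm : 0 ≤ maxsplit
    · rw [if_pos hm, if_neg (by omega : ¬ maxsplit < 0),
        PySem.List.slice_to _ (by omega : (0 : Int) ≤ maxsplit + 1)]
      have hfull : pvAll string.toList sep.toList (pvMsFrom string.toList sep.toList 0) 0 =
          pvRhs string.toList sep.toList string.toList.length 0 0 none :=
        (pvRhs_none string.toList sep.toList string.toList.length 0 0 (by omega) (by omega)).symm
      rw [hfull,
        pvRhs_some string.toList sep.toList string.toList.length 0 0 ((maxsplit + 1).toNat)
          (by omega)
          (by intro h0; exfalso; omega)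
          (by
            intro hL hm1
            simp only [Nat.zero_add]
            intro hEq
            apply hnD
            refine ⟨?_, by omega, hm⟩
            have hse : sep = "" := by
              have hcong := congrArg String.ofList hL
              rwa [String.ofList_toList] at hcong
            rw [hse]),
        List.map_take]
    · rw [if_neg hm, if_pos (by omega : maxsplit < 0),
        pvRhs_none string.toList sep.toList string.toList.length 0 0 (by omega) (by omega)]

theorem split_imitate_changed : Claim_changed_split_imitate := by
  unfold Claim_changed_split_imitate
  decide

theorem split_imitate_tight : Claim_exact_split_imitate := by
  unfold Claim_exact_split_imitate
  intro string separator maxsplit _hdom hD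
  obtain ⟨hsep, hms, hm0⟩ := hD
  subst hsep
  intro hEq
  have hlenstr : 1 ≤ string.toList.length := by
    by_contra h
    have : string.toList.length = 0 := by omega
    omega
  have hsepL : ("" : String).toList = ([] : List Char) := rfl
  have hmtoNat : (maxsplit + 1).toNat = string.toList.length := by omega
  -- reduce A
  have hA : split_imitate string (some "") maxsplit =
      (pvAll string.toList [] (pvMsFrom string.toList [] 0) 0).map String.ofList := by
    unfold split_imitate
    simp only
    have h01 : ¬ (("" : String).toList.length = 1) := by decide
    rw [if_neg h01]
    have hgen := a_sep_eq string "" maxsplit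
    rw [if_neg h01] at hgen
    rw [hgen, if_pos hm0, hsepL, hmtoNat,
      pvRhs_some_full string.toList string.toList.length 0 0 string.toList.length (by omega),
      pvRhs_none string.toList [] string.toList.length 0 0 (by omega) (by omega)]
  -- reduce B
  have hB : split_imitate_alt string (some "") maxsplit =
      (((pvAll string.toList [] (pvMsFrom string.toList [] 0) 0).map String.ofList).take
        (maxsplit + 1).toNat) := by
    unfold split_imitate_alt
    simp only
    have hms' := b_ms_eq string ""
    rw [hsepL] at hms'
    have hb := b_pieces_eq string ""
    rw [hsepL] at hb
    simp only [hsepL]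
    rw [hms', hb, if_neg (by omega : ¬ maxsplit < 0),
      PySem.List.slice_to _ (by omega : (0 : Int) ≤ maxsplit + 1)]
  -- the two sides have different lengths
  have hlenAll : (pvAll string.toList [] (pvMsFrom string.toList [] 0) 0).length =
      string.toList.length + 1 := by
    rw [pvAll_decomp, List.length_append, pvPieces_length, msFrom_nil_sep, List.length_range']
    have hfin : pvFinal [] (List.range' 0 string.toList.length) 0 = string.toList.length - 1 := by
      rw [pvFinal_nil_sep, getLastD_range', if_neg (by omega)]
      omega
    rw [hfin]
    unfold pvTail
    rw [if_pos (by omega)]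
    simp
  rw [hA, hB] at hEq
  have := congrArg List.length hEq
  rw [List.length_take, List.length_map, hlenAll] at this
  omega
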